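-- pv_equiv track=rewrite | github.com/Robin-Short/chess | chesslibGraphic.py | cercaArrivo
-- ===== SOURCE A (Python) =====
-- numeri = '12345678'
--
-- lettere = 'abcdefgh'
--
-- def cercaArrivo(mossaAlg):
--     q = ''
--     x = mossaAlg[::-1] # sarebbe la stringa letta al contrario
--     for ch in x:
--         if len(q) == 2: return q
--         elif len(q) == 1:
--             if ch in lettere: return ch+q
--             else:
--                 q = ''
--         elif len(q) == 0:
--             if ch in numeri:
--                 q = ch
-- ===== SOURCE B (Python) =====
-- numeri = '12345678'
-- lettere = 'abcdefgh'
--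
-- def cercaArrivo(mossaAlg):
--     i = len(mossaAlg) - 1
--     while i >= 0:
--         if mossaAlg[i] in numeri:
--             if i - 1 >= 0 and mossaAlg[i - 1] in lettere:
--                 return mossaAlg[i - 1] + mossaAlg[i]
--             i -= 2
--         else:
--             i -= 1
--     return None
-- ===== Notes on version B (the rewrite author's own statement) =====
-- stated objective: simpler
-- what changed: Replaces the reversed-copy plus two-state string accumulator with a direct right-to-left index scan that looks at the previous character when a digit is found, preserving the skip-two-on-mismatch behaviour with no reversal and no accumulator.
import Mathlib
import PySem

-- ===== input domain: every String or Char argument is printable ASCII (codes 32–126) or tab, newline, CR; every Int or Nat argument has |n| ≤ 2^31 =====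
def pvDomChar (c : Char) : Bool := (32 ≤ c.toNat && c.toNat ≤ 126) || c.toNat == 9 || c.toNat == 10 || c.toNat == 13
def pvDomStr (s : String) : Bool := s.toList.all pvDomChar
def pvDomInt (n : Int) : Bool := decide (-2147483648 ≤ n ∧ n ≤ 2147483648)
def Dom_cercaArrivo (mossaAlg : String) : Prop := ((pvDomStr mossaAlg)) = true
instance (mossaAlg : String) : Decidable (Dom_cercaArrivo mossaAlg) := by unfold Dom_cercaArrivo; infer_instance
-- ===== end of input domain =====

-- B replaces A's reversed copy and two-state accumulator with a direct index scan from the end; same values, simpler decomposition.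

-- ===== PORT A =====
def numeriA : List Char := "12345678".toList
def lettereA : List Char := "abcdefgh".toList

-- the for-loop of A: state q (accumulated characters, most recent first as in ch+q)
def cercaArrivoLoop : List Char → List Char → Option String
  | [], _ => none
  | ch :: rest, q =>
    if q.length == 2 then some (String.ofList q)
    else if q.length == 1 then
      if lettereA.contains ch then some (String.ofList (ch :: q))
      else cercaArrivoLoop rest []
    else if numeriA.contains ch then cercaArrivoLoop rest [ch]
    else cercaArrivoLoop rest q

def cercaArrivo (mossaAlg : String) : Option String :=
  cercaArrivoLoop mossaAlg.toList.reverse []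

-- ===== PORT B =====
-- B's while loop on index i; argument n encodes i = n - 1 (n = 0 ⇔ i < 0, loop ends)
def cercaArrivoAltGo (s : List Char) : Nat → Option String
  | 0 => none
  | j + 1 =>
    if numeriA.contains (s.getD j ' ') then
      if 1 ≤ j ∧ lettereA.contains (s.getD (j - 1) ' ') then
        some (String.ofList [s.getD (j - 1) ' ', s.getD j ' '])
      else cercaArrivoAltGo s (j - 1)   -- i -= 2
    else cercaArrivoAltGo s j           -- i -= 1

def cercaArrivo_alt (mossaAlg : String) : Option String :=
  cercaArrivoAltGo mossaAlg.toList mossaAlg.toList.length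

-- ===== PRECONDITION & SPEC =====
def Spec_cercaArrivo (mossaAlg : String) (out : Option String) : Prop := out = cercaArrivo_alt mossaAlg
instance (mossaAlg : String) (out : Option String) : Decidable (Spec_cercaArrivo mossaAlg out) := by unfold Spec_cercaArrivo; infer_instance

-- ===== CLAIM (what is proved, stated in full; the proofs are below) =====
def Claim_equal_cercaArrivo : Prop := ∀ (mossaAlg : String), Dom_cercaArrivo mossaAlg → Spec_cercaArrivo mossaAlg (cercaArrivo mossaAlg)

-- ===== LEMMAS AND PROOFS =====

lemma take_reverse_succ (s : List Char) (j : Nat) (h : j < s.length) :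
    (s.take (j + 1)).reverse = s.getD j ' ' :: (s.take j).reverse := by
  rw [List.take_add_one, List.getElem?_eq_getElem h]
  simp [List.getD, List.getElem?_eq_getElem h]

lemma loop_eq_go (s : List Char) :
    ∀ j, j ≤ s.length → cercaArrivoLoop ((s.take j).reverse) [] = cercaArrivoAltGo s j := by
  intro j
  induction j using Nat.strong_induction_on with
  | _ j ih =>
    match j with
    | 0 => intro _; simp [cercaArrivoLoop, cercaArrivoAltGo]
    | jp + 1 =>
      intro hle
      have hlt : jp < s.length := hle
      rw [take_reverse_succ s jp hlt]
      by_cases hd : s.getD jp ' ' ∈ numeriA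
      · -- digit at position jp: A sets q = [that char], B examines s[jp-1]
        match jp, hlt, hd with
        | 0, _, hd =>
          simp only [List.getD] at hd
          simp [cercaArrivoLoop, cercaArrivoAltGo, hd]
        | k + 1, hlt', hd =>
          have hk : k < s.length := Nat.lt_of_succ_lt hlt'
          simp only [List.getD] at hd
          rw [show cercaArrivoLoop (s.getD (k+1) ' ' :: (s.take (k+1)).reverse) [] =
                cercaArrivoLoop ((s.take (k+1)).reverse) [s.getD (k+1) ' '] by
              simp [cercaArrivoLoop, List.getD, hd]]
          rw [take_reverse_succ s k hk]
          by_cases hl : s.getD k ' ' ∈ lettereA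
          · simp only [List.getD] at hl
            simp [cercaArrivoLoop, cercaArrivoAltGo, hd, hl, List.getD]
          · simp only [List.getD] at hl
            rw [show cercaArrivoLoop (s.getD k ' ' :: (s.take k).reverse) [s.getD (k+1) ' '] =
                  cercaArrivoLoop ((s.take k).reverse) [] by simp [cercaArrivoLoop, List.getD, hl]]
            rw [ih k (by omega) (Nat.le_of_lt hk)]
            simp [cercaArrivoAltGo, hd, hl, List.getD]
      · -- not a digit: both just move left
        simp only [List.getD] at hd
        rw [show cercaArrivoLoop (s.getD jp ' ' :: (s.take jp).reverse) [] =
              cercaArrivoLoop ((s.take jp).reverse) [] by simp [cercaArrivoLoop, List.getD, hd]]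
        rw [ih jp (by omega) (Nat.le_of_lt hlt)]
        simp [cercaArrivoAltGo, hd, List.getD]

-- ===== VERDICT (by name: the statement is the Claim_ definition above) =====
theorem cercaArrivo_spec : Claim_equal_cercaArrivo := by
  intro s _
  unfold Spec_cercaArrivo cercaArrivo cercaArrivo_alt
  have := loop_eq_go s.toList s.toList.length (le_refl _)
  rwa [List.take_length] at this
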